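-- pv_equiv track=rewrite | github.com/Yoon-men/CodingTest | BaekJoon/16947.py | joyGo
-- ===== SOURCE A (Python) =====
-- from collections import deque
--
-- def joyGo(N: int, graph: list) -> list :
--     # DFS: Check if there is a cycle starting from the start_node.
--     def DFS(start_node: int, cnt: int) -> int :
--         if visited[start_node] :
--             if cnt - dist[start_node] >= 3 :
--                 return start_node
--             else :
--                 return -1
--
--         visited[start_node] = 1
--         dist[start_node] = cnt
--
--         for next_node in graph[start_node] :
--             start_node_of_cycle = DFS(next_node, cnt+1)
--             if start_node_of_cycle != -1 :
--                 visited[start_node] = 2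
--                 if start_node == start_node_of_cycle : return -1
--                 else : return start_node_of_cycle
--
--         return -1
--
--     # BFS: Check how far away each node is from the cycle.
--     def BFS() -> list :
--         ans_list = [-1] * N
--         dq = deque()
--
--         for node in range(N) :
--             if visited[node] == 2 :
--                 ans_list[node] = 0
--                 dq.append(node)
--
--         while dq :
--             cur_node = dq.popleft()
--             for next_node in graph[cur_node] :
--                 if ans_list[next_node] == -1 :
--                     ans_list[next_node] = ans_list[cur_node] + 1
--                     dq.append(next_node)
--
--         return ans_list
--
--
--     visited = [0] * N
--     dist = [0] * N
--
--     DFS(0, 0)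
--     ans_list = BFS()
--
--     return ans_list
-- ===== SOURCE B (Python) =====
-- from collections import deque
--
-- def joyGo(N: int, graph: list) -> list:
--     # Same cycle semantics as the recursive solution, but the DFS is driven by an
--     # explicit stack of [node, next-neighbour-index, cnt] frames; `ret` carries the
--     # value a finished "call" hands back to the frame below it (-1 = no cycle found).
--     visited = [0] * N
--     dist = [0] * N
--
--     stack = []
--
--     def enter(node: int, cnt: int) -> int:
--         # Start a "call" on node: if already visited, its result is immediate;
--         # otherwise mark it, push a frame and let the main loop run its neighbours.
--         if visited[node]:
--             return node if cnt - dist[node] >= 3 else -1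
--         visited[node] = 1
--         dist[node] = cnt
--         stack.append([node, 0, cnt])
--         return -1
--
--     ret = enter(0, 0)
--     while stack:
--         node, i, cnt = stack[-1]
--         if ret != -1:
--             # a child found a cycle: mark this node, propagate (or stop at the start)
--             visited[node] = 2
--             ret = -1 if node == ret else ret
--             stack.pop()
--         elif i < len(graph[node]):
--             stack[-1][1] = i + 1
--             ret = enter(graph[node][i], cnt + 1)
--         else:
--             stack.pop()
--             ret = -1
--
--     # BFS: multi-source from the cycle nodes (unchanged)
--     ans_list = [-1] * N
--     dq = deque()
--
--     for node in range(N):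
--         if visited[node] == 2:
--             ans_list[node] = 0
--             dq.append(node)
--
--     while dq:
--         cur_node = dq.popleft()
--         for next_node in graph[cur_node]:
--             if ans_list[next_node] == -1:
--                 ans_list[next_node] = ans_list[cur_node] + 1
--                 dq.append(next_node)
--
--     return ans_list
-- ===== Notes on version B (the rewrite author's own statement) =====
-- stated objective: alternative
-- what changed: The recursive cycle-finding DFS is replaced by an explicit-stack machine (frames of node/neighbour-index/cnt with a propagated return value), eliminating Python recursion; the multi-source BFS phase is unchanged.
-- outside the precondition, e.g. on joyGo(2, [[0], [9]]): A returns [-1, -1], B returns [-1, -1]; on joyGo(3, [[1], [0], [5]]): A returns [-1, -1, -1], B returns [-1, -1, -1]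
import Mathlib
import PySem

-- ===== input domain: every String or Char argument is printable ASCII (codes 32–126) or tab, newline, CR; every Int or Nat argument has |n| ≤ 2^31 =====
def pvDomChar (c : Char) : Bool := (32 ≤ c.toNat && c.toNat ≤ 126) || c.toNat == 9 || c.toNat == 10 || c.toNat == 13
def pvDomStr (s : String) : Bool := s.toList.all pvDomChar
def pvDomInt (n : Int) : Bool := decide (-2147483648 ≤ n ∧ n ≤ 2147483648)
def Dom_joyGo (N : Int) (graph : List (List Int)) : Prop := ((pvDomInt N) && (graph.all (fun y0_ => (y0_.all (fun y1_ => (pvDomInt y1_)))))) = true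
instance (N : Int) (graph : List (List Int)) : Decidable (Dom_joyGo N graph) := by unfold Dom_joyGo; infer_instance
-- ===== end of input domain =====

-- B replaces A's recursive cycle-finding DFS by an explicit-stack machine with the
-- same marking semantics (alternative decomposition, same cost); the BFS phase is
-- unchanged and shared by both ports.

-- ===== PORT A =====
-- shared Python-primitive shorthands (used by both ports)
def pvGetI (xs : List Int) (i : Int) : Int := PySem.List.pyGetD xs i 0
def pvSet (xs : List Int) (i : Int) (v : Int) : List Int := PySem.List.pySetD xs i v
def pvRow (g : List (List Int)) (i : Int) : List Int := PySem.List.pyGetD g i []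

-- the BFS phase is textually identical in A and in B; one shared transliteration
-- (fuel only makes the queue loop total; it is never exhausted on Pre_ inputs)
def bfsLoop (g : List (List Int)) : Nat → List Int → List Int → List Int
  | 0, _, ans => ans
  | _ + 1, [], ans => ans
  | fuel + 1, cur :: dq, ans =>
    let p := (pvRow g cur).foldl
      (fun (p : List Int × List Int) nx =>
        if pvGetI p.1 nx = -1 then (pvSet p.1 nx (pvGetI p.1 cur + 1), p.2 ++ [nx]) else p)
      (ans, dq)
    bfsLoop g fuel p.2 p.1

def bfsRun (N : Int) (g : List (List Int)) (vis : List Int) : List Int :=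
  let init := (PySem.List.pyRange 0 N 1).foldl
    (fun (p : List Int × List Int) node =>
      if pvGetI vis node = 2 then (pvSet p.1 node 0, p.2 ++ [node]) else p)
    (List.replicate N.toNat (-1), [])
  bfsLoop g (2 * N.toNat + 2) init.2 init.1

-- A's recursive DFS: the inner `for next_node in graph[start_node]` loop
def dfsLoopA (f : Int → Int → List Int × List Int → Int × (List Int × List Int)) :
    List Int → Int → Int → List Int × List Int → Int × (List Int × List Int)
  | [], _, _, s => (-1, s)
  | m :: rest, node, cnt, s =>
    let r := f m (cnt + 1) s
    if r.1 ≠ -1 then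
      ((if node = r.1 then -1 else r.1), (pvSet r.2.1 node 2, r.2.2))
    else dfsLoopA f rest node cnt r.2

-- A's DFS; fuel only makes the recursion total (N.toNat + 1 is enough on Pre_ inputs)
def dfsA (g : List (List Int)) : Nat → Int → Int → List Int × List Int → Int × (List Int × List Int)
  | 0, _, _, s => (-1, s)
  | fuel + 1, node, cnt, s =>
    if pvGetI s.1 node ≠ 0 then
      ((if 3 ≤ cnt - pvGetI s.2 node then node else -1), s)
    else dfsLoopA (dfsA g fuel) (pvRow g node) node cnt (pvSet s.1 node 1, pvSet s.2 node cnt)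

def joyGo (N : Int) (graph : List (List Int)) : List Int :=
  let s0 : List Int × List Int := (List.replicate N.toNat 0, List.replicate N.toNat 0)
  let s1 := (dfsA graph (N.toNat + 1) 0 0 s0).2
  bfsRun N graph s1.1

-- ===== PORT B =====
-- B's explicit-stack DFS machine: stack of (node, next-neighbour-index, cnt) frames,
-- `ret` is the value the last finished call hands to the frame on top.
-- fuel only makes the while loop total (joyGo_alt passes plenty on Pre_ inputs).
def machineB (g : List (List Int)) :
    Nat → List (Int × Int × Int) → Int → List Int × List Int → List Int × List Int
  | 0, _, _, s => s
  | _ + 1, [], _, s => s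
  | fuel + 1, (node, i, cnt) :: rest, ret, s =>
    if ret ≠ -1 then
      machineB g fuel rest (if node = ret then -1 else ret) (pvSet s.1 node 2, s.2)
    else if i < ((pvRow g node).length : Int) then
      let m := pvGetI (pvRow g node) i
      if pvGetI s.1 m ≠ 0 then
        machineB g fuel ((node, i + 1, cnt) :: rest)
          (if 3 ≤ (cnt + 1) - pvGetI s.2 m then m else -1) s
      else
        machineB g fuel ((m, 0, cnt + 1) :: (node, i + 1, cnt) :: rest) (-1)
          (pvSet s.1 m 1, pvSet s.2 m (cnt + 1))
    else machineB g fuel rest (-1) s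

def maxRowB (g : List (List Int)) : Nat := g.foldl (fun a r => max a r.length) 0

def joyGo_alt (N : Int) (graph : List (List Int)) : List Int :=
  let s0 : List Int × List Int := (List.replicate N.toNat 0, List.replicate N.toNat 0)
  let s1 :=
    if pvGetI s0.1 0 ≠ 0 then s0
    else machineB graph ((maxRowB graph + 3) * (N.toNat + 2)) [(0, 0, 0)] (-1)
      (pvSet s0.1 0 1, pvSet s0.2 0 0)
  bfsRun N graph s1.1

-- ===== PRECONDITION & SPEC =====
-- Pre_ = N ≥ 1, a nonempty adjacency list, and either node 0 has no neighbours (the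
-- traversal stops immediately) or there are at least N rows and every neighbour is a
-- node id in [-N, N) (negative ids index from the end, exactly as in Python). A raises
-- (IndexError / RecursionError) on the rest, except for accidental corners excluded
-- here: inputs whose out-of-range rows or neighbours are never reached from node 0.
def Pre_joyGo (N : Int) (graph : List (List Int)) : Prop :=
  1 ≤ N ∧ 1 ≤ (graph.length : Int) ∧
    (graph.head? = some [] ∨
      (N ≤ (graph.length : Int) ∧ ∀ row ∈ graph, ∀ v ∈ row, -N ≤ v ∧ v < N))
instance (N : Int) (graph : List (List Int)) : Decidable (Pre_joyGo N graph) := by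
  unfold Pre_joyGo; infer_instance

def pvWitness_joyGo : Int × List (List Int) := (3, [[1], [2], [0]])

def Spec_joyGo (N : Int) (graph : List (List Int)) (out : List Int) : Prop := out = joyGo_alt N graph
instance (N : Int) (graph : List (List Int)) (out : List Int) : Decidable (Spec_joyGo N graph out) := by unfold Spec_joyGo; infer_instance

-- ===== CLAIM (what is proved, stated in full; the proofs are below) =====
def Claim_equal_joyGo : Prop := ∀ (N : Int) (graph : List (List Int)), Dom_joyGo N graph → Pre_joyGo N graph → Spec_joyGo N graph (joyGo N graph)

-- ===== LEMMAS AND PROOFS =====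

-- number of still-unvisited slots: the DFS termination measure
def uZ (l : List Int) : Nat := l.countP (fun v => v == 0)

-- the non-degenerate branch of Pre_: a fully usable adjacency list
def GoodG (N : Int) (g : List (List Int)) : Prop :=
  1 ≤ N ∧ N ≤ (g.length : Int) ∧ ∀ row ∈ g, ∀ v ∈ row, -N ≤ v ∧ v < N

-- state invariant: both arrays keep length N
def InvS (N : Int) (s : List Int × List Int) : Prop :=
  s.1.length = N.toNat ∧ s.2.length = N.toNat

-- a usable node id (Python wraps negative ids)
def NodeOk (N : Int) (m : Int) : Prop := -N ≤ m ∧ m < N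

-- Python's normalised index
def nIdx (len : Nat) (i : Int) : Nat := if i < 0 then ((len : Int) + i).toNat else i.toNat

lemma nIdx_lt (len : Nat) (i : Int) (h0 : -(len : Int) ≤ i) (h1 : i < (len : Int)) :
    nIdx len i < len := by unfold nIdx; split <;> omega

def StackOK (N : Int) (st : List (Int × Int × Int)) : Prop :=
  ∀ fr ∈ st, NodeOk N fr.1 ∧ 0 ≤ fr.2.1

-- weight of one stack frame / of a machine configuration (B's step-count bound)
def wF (g : List (List Int)) (fr : Int × Int × Int) : Nat :=
  (((pvRow g fr.1).length : Int) - fr.2.1).toNat + 2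

def phi (g : List (List Int)) (st : List (Int × Int × Int)) (s : List Int × List Int) : Nat :=
  (st.map (wF g)).sum + uZ s.1 * (maxRowB g + 3)

-- what the machine's remaining stack denotes in terms of A's recursion
def resumeR (g : List (List Int)) :
    List (Int × Int × Int) → Int → List Int × List Int → List Int × List Int
  | [], _, s => s
  | (node, i, cnt) :: rest, ret, s =>
    if ret ≠ -1 then resumeR g rest (if node = ret then -1 else ret) (pvSet s.1 node 2, s.2)
    else
      let r := dfsLoopA (dfsA g (uZ s.1 + 1)) ((pvRow g node).drop i.toNat) node cnt s
      resumeR g rest r.1 r.2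

lemma uZ_set_le (l : List Int) (j : Nat) (v : Int) (hv : v ≠ 0) : uZ (l.set j v) ≤ uZ l := by
  induction l generalizing j with
  | nil => simp [uZ]
  | cons x xs ih =>
    cases j with
    | zero => simp [uZ, List.countP_cons]; split <;> split <;> simp_all
    | succ j =>
      simp only [uZ, List.set, List.countP_cons] at *
      have := ih j
      omega

lemma uZ_set_eq (l : List Int) (j : Nat) (v : Int) (hj : j < l.length) (h0 : l[j] = 0)
    (hv : v ≠ 0) : uZ (l.set j v) + 1 = uZ l := by
  induction l generalizing j with
  | nil => simp at hj
  | cons x xs ih =>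
    cases j with
    | zero => simp_all [uZ]
    | succ j =>
      simp only [List.length_cons] at hj
      simp only [List.getElem_cons_succ] at h0
      simp only [uZ, List.set, List.countP_cons] at *
      have := ih j (by omega) h0
      omega

lemma uZ_replicate (n : Nat) : uZ (List.replicate n 0) = n := by
  simp [uZ, List.countP_replicate]

lemma le_maxRowB (g : List (List Int)) (r : List Int) (hr : r ∈ g) : r.length ≤ maxRowB g := by
  have key : ∀ (g : List (List Int)) (a : Nat),
      (a ≤ g.foldl (fun a r => max a r.length) a) ∧
      (∀ r ∈ g, r.length ≤ g.foldl (fun a r => max a r.length) a) := by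
    intro g
    induction g with
    | nil => simp
    | cons x xs ih =>
      intro a
      constructor
      · simp only [List.foldl_cons]
        exact le_trans (le_max_left a x.length) (ih (max a x.length)).1
      · intro r hr
        rcases List.mem_cons.mp hr with rfl | hr
        · simp only [List.foldl_cons]
          exact le_trans (le_max_right a r.length) (ih _).1
        · simp only [List.foldl_cons]
          exact (ih (max a x.length)).2 r hr
  exact (key g 0).2 r hr

-- basic facts about the shared primitives on in-range indices
lemma pvGetI_in (l : List Int) (i : Int) (h0 : 0 ≤ i) (h1 : i < (l.length : Int)) :
    pvGetI l i = l[i.toNat]'(by omega) := by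
  simpa [pvGetI] using PySem.List.pyGetD_eq_getElem l (i := i) 0 h0 (by simpa using h1)

lemma pvSet_nonneg (l : List Int) (i : Int) (v : Int) (h0 : 0 ≤ i) :
    pvSet l i v = l.set i.toNat v := by
  simpa [pvSet] using PySem.List.pySetD_of_nonneg l (i := i) v h0

lemma pyGetD_norm {α : Type} (l : List α) (i : Int) (d : α) (h0 : -(l.length : Int) ≤ i)
    (h1 : i < (l.length : Int)) : PySem.List.pyGetD l i d = l.getD (nIdx l.length i) d := by
  simp only [PySem.List.pyGetD, PySem.List.pyGet?, PySem.List.pyIdx?, List.getD_eq_getElem?_getD]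
  split
  · have : i.toNat = nIdx l.length i := by unfold nIdx; split <;> omega
    rw [this]; simp
  · have : l.length - (-i).toNat = nIdx l.length i := by unfold nIdx; split <;> omega
    rw [this]; simp

lemma pvGetI_norm (l : List Int) (i : Int) (h0 : -(l.length : Int) ≤ i)
    (h1 : i < (l.length : Int)) : pvGetI l i = l.getD (nIdx l.length i) 0 :=
  pyGetD_norm l i 0 h0 h1

lemma pvSet_norm (l : List Int) (i : Int) (v : Int) (h0 : -(l.length : Int) ≤ i)
    (h1 : i < (l.length : Int)) : pvSet l i v = l.set (nIdx l.length i) v := by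
  simp only [pvSet, PySem.List.pySetD, PySem.List.pySet?, PySem.List.pyIdx?]
  split
  · simp only [Option.map_some, Option.getD_some]
    have : i.toNat = nIdx l.length i := by unfold nIdx; split <;> omega
    rw [this]
  · simp only [Option.map_some, Option.getD_some]
    have : l.length - (-i).toNat = nIdx l.length i := by unfold nIdx; split <;> omega
    rw [this]

lemma length_pvSet (l : List Int) (i v : Int) : (pvSet l i v).length = l.length := by
  simp [pvSet, PySem.List.length_pySetD]

lemma uZ_pvSet_le (l : List Int) (i : Int) (v : Int) (hv : v ≠ 0) :
    uZ (pvSet l i v) ≤ uZ l := by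
  have hrep : pvSet l i v = (Option.map (fun k => l.set k v) (PySem.List.pyIdx? l.length i)).getD l := by
    simp only [pvSet, PySem.List.pySetD, PySem.List.pySet?]
  rw [hrep]
  cases PySem.List.pyIdx? l.length i with
  | none => simp
  | some j => simpa using uZ_set_le l j v hv

lemma pvRow_mem (N : Int) (g : List (List Int)) (h : GoodG N g) (node : Int)
    (hn : NodeOk N node) : pvRow g node ∈ g := by
  obtain ⟨h1, h2, h3⟩ := h
  obtain ⟨hn0, hn1⟩ := hn
  have hb0 : -(g.length : Int) ≤ node := by omega
  have hb1 : node < (g.length : Int) := by omega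
  have hj : nIdx g.length node < g.length := nIdx_lt _ _ hb0 hb1
  have : pvRow g node = g[nIdx g.length node]'hj := by
    simp only [pvRow]
    rw [pyGetD_norm g node [] hb0 hb1, List.getD_eq_getElem g [] hj]
  rw [this]; exact List.getElem_mem hj

lemma pvRow_ok (N : Int) (g : List (List Int)) (h : GoodG N g) (node : Int)
    (hn : NodeOk N node) : ∀ m ∈ pvRow g node, NodeOk N m := by
  intro m hm
  exact h.2.2 (pvRow g node) (pvRow_mem N g h node hn) m hm

-- the main invariant of A's recursive DFS: state lengths are preserved, the number of
-- unvisited slots never grows, and any fuel above that number computes the same result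
lemma dfs_main (N : Int) (g : List (List Int)) (h : GoodG N g) (fuel : Nat) :
    (∀ node cnt s, InvS N s → NodeOk N node → uZ s.1 < fuel →
       InvS N (dfsA g fuel node cnt s).2 ∧ uZ (dfsA g fuel node cnt s).2.1 ≤ uZ s.1 ∧
       ∀ f', uZ s.1 < f' → dfsA g f' node cnt s = dfsA g fuel node cnt s)
  ∧ (∀ ns node cnt s, InvS N s → (∀ m ∈ ns, NodeOk N m) → NodeOk N node → uZ s.1 < fuel →
       InvS N (dfsLoopA (dfsA g fuel) ns node cnt s).2 ∧
       uZ (dfsLoopA (dfsA g fuel) ns node cnt s).2.1 ≤ uZ s.1 ∧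
       ∀ f', uZ s.1 < f' →
         dfsLoopA (dfsA g f') ns node cnt s = dfsLoopA (dfsA g fuel) ns node cnt s) := by
  induction fuel with
  | zero =>
    exact ⟨fun _ _ _ _ _ hu => absurd hu (Nat.not_lt_zero _),
           fun _ _ _ _ _ _ _ hu => absurd hu (Nat.not_lt_zero _)⟩
  | succ f ih =>
    have hdfs : ∀ node cnt s, InvS N s → NodeOk N node → uZ s.1 < f + 1 →
        InvS N (dfsA g (f+1) node cnt s).2 ∧ uZ (dfsA g (f+1) node cnt s).2.1 ≤ uZ s.1 ∧
        ∀ f', uZ s.1 < f' → dfsA g f' node cnt s = dfsA g (f+1) node cnt s := by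
      intro node cnt s hInv hnode hu
      by_cases hv : pvGetI s.1 node ≠ 0
      · have hunf : ∀ f'', dfsA g (f''+1) node cnt s =
            ((if 3 ≤ cnt - pvGetI s.2 node then node else -1), s) := by
          intro f''; simp [dfsA, hv]
        rw [hunf f]
        refine ⟨hInv, le_refl _, ?_⟩
        intro f' hf'
        cases f' with
        | zero => omega
        | succ f'' => rw [hunf f'']
      · push_neg at hv
        have hlen1 : s.1.length = N.toNat := hInv.1
        have hbnd : -(s.1.length : Int) ≤ node ∧ node < (s.1.length : Int) := by
          have hp1 := h.1; obtain ⟨ha, hb⟩ := hnode; omega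
        have hnN : nIdx s.1.length node < s.1.length := nIdx_lt _ _ hbnd.1 hbnd.2
        have hget0 : s.1[nIdx s.1.length node]'hnN = 0 := by
          rw [← List.getD_eq_getElem s.1 0 hnN, ← pvGetI_norm s.1 node hbnd.1 hbnd.2]
          exact hv
        have hmark : uZ (pvSet s.1 node 1) + 1 = uZ s.1 := by
          rw [pvSet_norm s.1 node 1 hbnd.1 hbnd.2]
          exact uZ_set_eq s.1 (nIdx s.1.length node) 1 hnN hget0 (by norm_num)
        have hInv' : InvS N (pvSet s.1 node 1, pvSet s.2 node cnt) :=
          ⟨by show (pvSet s.1 node 1).length = N.toNat; rw [length_pvSet]; exact hInv.1,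
           by show (pvSet s.2 node cnt).length = N.toNat; rw [length_pvSet]; exact hInv.2⟩
        have hrow := pvRow_ok N g h node hnode
        have hpair : uZ ((pvSet s.1 node 1, pvSet s.2 node cnt) : List Int × List Int).1
            = uZ (pvSet s.1 node 1) := rfl
        have hu' : uZ (pvSet s.1 node 1) < f := by omega
        obtain ⟨hI2, hu2, hF2⟩ :=
          ih.2 (pvRow g node) node cnt (pvSet s.1 node 1, pvSet s.2 node cnt) hInv' hrow hnode
            (by omega)
        have he : ∀ f'', dfsA g (f''+1) node cnt s =
            dfsLoopA (dfsA g f'') (pvRow g node) node cnt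
              (pvSet s.1 node 1, pvSet s.2 node cnt) := by
          intro f''; simp [dfsA, hv]
        rw [he f]
        refine ⟨hI2, by omega, ?_⟩
        intro f' hf'
        cases f' with
        | zero => omega
        | succ f'' =>
          rw [he f'', hF2 f'' (by omega)]
    refine ⟨hdfs, ?_⟩
    intro ns
    induction ns with
    | nil =>
      intro node cnt s hInv _ _ hu
      exact ⟨hInv, le_refl _, fun f' _ => rfl⟩
    | cons m rest ihl =>
      intro node cnt s hInv hns hnode hu
      obtain ⟨hIm, hum, hFm⟩ := hdfs m (cnt+1) s hInv (hns m List.mem_cons_self) hu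
      by_cases hc : (dfsA g (f+1) m (cnt+1) s).1 ≠ -1
      · have he : dfsLoopA (dfsA g (f+1)) (m :: rest) node cnt s =
            ((if node = (dfsA g (f+1) m (cnt+1) s).1 then -1 else (dfsA g (f+1) m (cnt+1) s).1),
             (pvSet (dfsA g (f+1) m (cnt+1) s).2.1 node 2, (dfsA g (f+1) m (cnt+1) s).2.2)) := by
          simp [dfsLoopA, hc]
        rw [he]
        refine ⟨⟨by show (pvSet _ node 2).length = N.toNat; rw [length_pvSet]; exact hIm.1, hIm.2⟩,
          le_trans (uZ_pvSet_le _ _ _ (by norm_num)) hum, ?_⟩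
        intro f' hf'
        have hr' : dfsA g f' m (cnt+1) s = dfsA g (f+1) m (cnt+1) s := hFm f' hf'
        have he' : dfsLoopA (dfsA g f') (m :: rest) node cnt s =
            ((if node = (dfsA g (f+1) m (cnt+1) s).1 then -1 else (dfsA g (f+1) m (cnt+1) s).1),
             (pvSet (dfsA g (f+1) m (cnt+1) s).2.1 node 2, (dfsA g (f+1) m (cnt+1) s).2.2)) := by
          simp [dfsLoopA, hr', hc]
        rw [he']
      · push_neg at hc
        have he : ∀ fd, (dfsA g fd m (cnt+1) s).1 = -1 →
            dfsLoopA (dfsA g fd) (m :: rest) node cnt s =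
            dfsLoopA (dfsA g fd) rest node cnt (dfsA g fd m (cnt+1) s).2 := by
          intro fd hfd; simp [dfsLoopA, hfd]
        obtain ⟨hI3, hu3, hF3⟩ := ihl node cnt (dfsA g (f+1) m (cnt+1) s).2 hIm
          (fun m' hm' => hns m' (List.mem_cons_of_mem m hm')) hnode (by omega)
        rw [he (f+1) hc]
        refine ⟨hI3, le_trans hu3 hum, ?_⟩
        intro f' hf'
        have hr' : dfsA g f' m (cnt+1) s = dfsA g (f+1) m (cnt+1) s := hFm f' hf'
        rw [he f' (by rw [hr']; exact hc)]
        rw [hr', hF3 f' (by omega)]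

-- frames denote suspended loops: popping/pushing in B's machine computes exactly
-- what resuming A's recursion would
lemma sim (N : Int) (g : List (List Int)) (h : GoodG N g) :
    ∀ fB : Nat, ∀ st ret s, InvS N s → StackOK N st → phi g st s < fB →
      machineB g fB st ret s = resumeR g st ret s := by
  intro fB
  induction fB with
  | zero => intro st ret s _ _ hphi; omega
  | succ fB ih =>
    intro st ret s hInv hOK hphi
    match st with
    | [] => rfl
    | (node, i, cnt) :: rest =>
      have hnode : NodeOk N node := (hOK _ List.mem_cons_self).1
      have hi0 : 0 ≤ i := (hOK _ List.mem_cons_self).2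
      have hOKr : StackOK N rest := fun fr hf => hOK fr (List.mem_cons_of_mem _ hf)
      have hphi' : (((node, i, cnt) :: rest).map (wF g)).sum + uZ s.1 * (maxRowB g + 3) < fB + 1 := hphi
      simp only [List.map_cons, List.sum_cons] at hphi'
      have hw2 : 2 ≤ wF g (node, i, cnt) := Nat.le_add_left 2 _
      by_cases hr : ret ≠ -1
      · -- a child found a cycle: mark, pop, propagate
        have hm : machineB g (fB+1) ((node, i, cnt) :: rest) ret s =
            machineB g fB rest (if node = ret then -1 else ret) (pvSet s.1 node 2, s.2) := by
          simp [machineB, hr]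
        have hres : resumeR g ((node, i, cnt) :: rest) ret s =
            resumeR g rest (if node = ret then -1 else ret) (pvSet s.1 node 2, s.2) := by
          simp [resumeR, hr]
        rw [hm, hres]
        have hI2 : InvS N (pvSet s.1 node 2, s.2) :=
          ⟨by show (pvSet s.1 node 2).length = N.toNat; rw [length_pvSet]; exact hInv.1, hInv.2⟩
        apply ih rest _ _ hI2 hOKr
        have h1 : uZ (pvSet s.1 node 2) ≤ uZ s.1 := uZ_pvSet_le _ _ _ (by norm_num)
        have hmul : uZ (pvSet s.1 node 2) * (maxRowB g + 3) ≤ uZ s.1 * (maxRowB g + 3) :=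
          Nat.mul_le_mul_right _ h1
        have : phi g rest (pvSet s.1 node 2, s.2) =
            (rest.map (wF g)).sum + uZ (pvSet s.1 node 2) * (maxRowB g + 3) := rfl
        rw [this]; omega
      · push_neg at hr
        by_cases hi : i < ((pvRow g node).length : Int)
        · have hiN : i.toNat < (pvRow g node).length := by omega
          have hgm : pvGetI (pvRow g node) i = (pvRow g node)[i.toNat]'hiN := pvGetI_in _ i hi0 hi
          have hmrow : pvGetI (pvRow g node) i ∈ pvRow g node := by
            rw [hgm]; exact List.getElem_mem hiN
          have hmok : NodeOk N (pvGetI (pvRow g node) i) := pvRow_ok N g h node hnode _ hmrow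
          have hdrop : (pvRow g node).drop i.toNat =
              pvGetI (pvRow g node) i :: (pvRow g node).drop (i.toNat + 1) := by
            rw [hgm]; exact (List.getElem_cons_drop hiN).symm
          have hwsucc : wF g (node, i, cnt) = wF g (node, i+1, cnt) + 1 := by
            simp only [wF]; omega
          by_cases hv : pvGetI s.1 (pvGetI (pvRow g node) i) ≠ 0
          · -- neighbour already visited: its call returns immediately
            have hm : machineB g (fB+1) ((node, i, cnt) :: rest) ret s =
                machineB g fB ((node, i+1, cnt) :: rest)
                  (if 3 ≤ (cnt + 1) - pvGetI s.2 (pvGetI (pvRow g node) i)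
                   then pvGetI (pvRow g node) i else -1) s := by
              simp [machineB, hr, hi, hv]
            have hOK2 : StackOK N ((node, i+1, cnt) :: rest) := by
              intro fr hf
              rcases List.mem_cons.mp hf with rfl | hf
              · exact ⟨hnode, by show (0:Int) ≤ i + 1; omega⟩
              · exact hOK fr (List.mem_cons_of_mem _ hf)
            have hphi2 : phi g ((node, i+1, cnt) :: rest) s < fB := by
              simp only [phi, List.map_cons, List.sum_cons]; omega
            rw [hm, ih _ _ _ hInv hOK2 hphi2]
            -- now both sides are resumeR; compare by unfolding one loop step
            have hchild : dfsA g (uZ s.1 + 1) (pvGetI (pvRow g node) i) (cnt + 1) s =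
                ((if 3 ≤ (cnt + 1) - pvGetI s.2 (pvGetI (pvRow g node) i)
                  then pvGetI (pvRow g node) i else -1), s) := by
              simp [dfsA, hv]
            have hL : resumeR g ((node, i, cnt) :: rest) ret s =
                resumeR g rest
                  (dfsLoopA (dfsA g (uZ s.1 + 1)) ((pvRow g node).drop i.toNat) node cnt s).1
                  (dfsLoopA (dfsA g (uZ s.1 + 1)) ((pvRow g node).drop i.toNat) node cnt s).2 := by
              simp [resumeR, hr]
            rw [hL, hdrop]
            by_cases hc : (if 3 ≤ (cnt + 1) - pvGetI s.2 (pvGetI (pvRow g node) i)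
                  then pvGetI (pvRow g node) i else -1) ≠ -1
            · have hloop : dfsLoopA (dfsA g (uZ s.1 + 1))
                  (pvGetI (pvRow g node) i :: (pvRow g node).drop (i.toNat + 1)) node cnt s =
                  ((if node = (if 3 ≤ (cnt + 1) - pvGetI s.2 (pvGetI (pvRow g node) i)
                      then pvGetI (pvRow g node) i else -1) then -1
                    else (if 3 ≤ (cnt + 1) - pvGetI s.2 (pvGetI (pvRow g node) i)
                      then pvGetI (pvRow g node) i else -1)),
                   (pvSet s.1 node 2, s.2)) := by
                simp only [dfsLoopA, hchild]
                simp [hc]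
              rw [hloop]
              simp [resumeR, hc]
            · push_neg at hc
              have hloop : dfsLoopA (dfsA g (uZ s.1 + 1))
                  (pvGetI (pvRow g node) i :: (pvRow g node).drop (i.toNat + 1)) node cnt s =
                  dfsLoopA (dfsA g (uZ s.1 + 1)) ((pvRow g node).drop (i.toNat + 1)) node cnt s := by
                simp only [dfsLoopA, hchild]
                simp [hc]
              rw [hloop]
              have hR : resumeR g ((node, i+1, cnt) :: rest)
                  (if 3 ≤ (cnt + 1) - pvGetI s.2 (pvGetI (pvRow g node) i)
                   then pvGetI (pvRow g node) i else -1) s =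
                  resumeR g rest
                    (dfsLoopA (dfsA g (uZ s.1 + 1)) ((pvRow g node).drop (i+1).toNat) node cnt s).1
                    (dfsLoopA (dfsA g (uZ s.1 + 1)) ((pvRow g node).drop (i+1).toNat) node cnt s).2 := by
                rw [hc]; simp [resumeR]
              rw [hR]
              have : (i+1).toNat = i.toNat + 1 := by omega
              rw [this]
          · -- neighbour unvisited: push a fresh frame / A recurses into it
            push_neg at hv
            have hm : machineB g (fB+1) ((node, i, cnt) :: rest) ret s =
                machineB g fB
                  ((pvGetI (pvRow g node) i, 0, cnt + 1) :: (node, i+1, cnt) :: rest) (-1)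
                  (pvSet s.1 (pvGetI (pvRow g node) i) 1,
                   pvSet s.2 (pvGetI (pvRow g node) i) (cnt + 1)) := by
              simp [machineB, hr, hi, hv]
            have hbm : -(s.1.length : Int) ≤ pvGetI (pvRow g node) i ∧
                pvGetI (pvRow g node) i < (s.1.length : Int) := by
              have hp1 := h.1; have hl := hInv.1; obtain ⟨ha, hb⟩ := hmok; omega
            have hmN : nIdx s.1.length (pvGetI (pvRow g node) i) < s.1.length :=
              nIdx_lt _ _ hbm.1 hbm.2
            have hget0 : s.1[nIdx s.1.length (pvGetI (pvRow g node) i)]'hmN = 0 := by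
              rw [← List.getD_eq_getElem s.1 0 hmN, ← pvGetI_norm _ _ hbm.1 hbm.2]
              exact hv
            have hmark : uZ (pvSet s.1 (pvGetI (pvRow g node) i) 1) + 1 = uZ s.1 := by
              rw [pvSet_norm _ _ _ hbm.1 hbm.2]
              exact uZ_set_eq _ _ 1 hmN hget0 (by norm_num)
            have hIM : InvS N (pvSet s.1 (pvGetI (pvRow g node) i) 1,
                pvSet s.2 (pvGetI (pvRow g node) i) (cnt + 1)) :=
              ⟨by show (pvSet s.1 _ 1).length = N.toNat; rw [length_pvSet]; exact hInv.1,
               by show (pvSet s.2 _ (cnt+1)).length = N.toNat; rw [length_pvSet]; exact hInv.2⟩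
            have hOK2 : StackOK N ((pvGetI (pvRow g node) i, 0, cnt + 1) ::
                (node, i+1, cnt) :: rest) := by
              intro fr hf
              rcases List.mem_cons.mp hf with rfl | hf
              · exact ⟨hmok, by show (0:Int) ≤ 0; omega⟩
              · rcases List.mem_cons.mp hf with rfl | hf
                · exact ⟨hnode, by show (0:Int) ≤ i + 1; omega⟩
                · exact hOK fr (List.mem_cons_of_mem _ hf)
            have hLm : (pvRow g (pvGetI (pvRow g node) i)).length ≤ maxRowB g :=
              le_maxRowB g _ (pvRow_mem N g h _ hmok)
            have hphi2 : phi g ((pvGetI (pvRow g node) i, 0, cnt + 1) :: (node, i+1, cnt) :: rest)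
                (pvSet s.1 (pvGetI (pvRow g node) i) 1,
                 pvSet s.2 (pvGetI (pvRow g node) i) (cnt + 1)) < fB := by
              have hmulK : uZ s.1 * (maxRowB g + 3) =
                  uZ (pvSet s.1 (pvGetI (pvRow g node) i) 1) * (maxRowB g + 3) + (maxRowB g + 3) := by
                rw [← hmark]; ring
              have hwm : wF g (pvGetI (pvRow g node) i, 0, cnt + 1) =
                  (pvRow g (pvGetI (pvRow g node) i)).length + 2 := by
                simp [wF]
              simp only [phi, List.map_cons, List.sum_cons]
              rw [hwm]
              omega
            rw [hm, ih _ _ _ hIM hOK2 hphi2]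
            -- unfold both resumeR sides and identify them via dfs_main's fuel clause
            have hL : resumeR g ((node, i, cnt) :: rest) ret s =
                resumeR g rest
                  (dfsLoopA (dfsA g (uZ s.1 + 1)) ((pvRow g node).drop i.toNat) node cnt s).1
                  (dfsLoopA (dfsA g (uZ s.1 + 1)) ((pvRow g node).drop i.toNat) node cnt s).2 := by
              simp [resumeR, hr]
            rw [hL, hdrop]
            -- child call at canonical fuel: recursion into the fresh state
            have hu1 : 1 ≤ uZ s.1 := by omega
            have hchild : dfsA g (uZ s.1 + 1) (pvGetI (pvRow g node) i) (cnt + 1) s =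
                dfsLoopA (dfsA g
                    (uZ (pvSet s.1 (pvGetI (pvRow g node) i) 1) + 1))
                  (pvRow g (pvGetI (pvRow g node) i)) (pvGetI (pvRow g node) i) (cnt + 1)
                  (pvSet s.1 (pvGetI (pvRow g node) i) 1,
                   pvSet s.2 (pvGetI (pvRow g node) i) (cnt + 1)) := by
              have : uZ s.1 = uZ (pvSet s.1 (pvGetI (pvRow g node) i) 1) + 1 := by omega
              conv_lhs => rw [show uZ s.1 + 1 = (uZ (pvSet s.1 (pvGetI (pvRow g node) i) 1) + 1) + 1 by omega]
              simp [dfsA, hv]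
            have hRM : resumeR g ((pvGetI (pvRow g node) i, 0, cnt + 1) :: (node, i+1, cnt) :: rest)
                (-1)
                (pvSet s.1 (pvGetI (pvRow g node) i) 1,
                 pvSet s.2 (pvGetI (pvRow g node) i) (cnt + 1)) =
                resumeR g ((node, i+1, cnt) :: rest)
                  (dfsA g (uZ s.1 + 1) (pvGetI (pvRow g node) i) (cnt + 1) s).1
                  (dfsA g (uZ s.1 + 1) (pvGetI (pvRow g node) i) (cnt + 1) s).2 := by
              rw [hchild]
              simp [resumeR]
            rw [hRM]
            -- invariants of the child's result, for the fuel-irrelevance step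
            obtain ⟨hIc, huc, _⟩ := (dfs_main N g h (uZ s.1 + 1)).1
              (pvGetI (pvRow g node) i) (cnt + 1) s hInv hmok (by omega)
            by_cases hc : (dfsA g (uZ s.1 + 1) (pvGetI (pvRow g node) i) (cnt + 1) s).1 ≠ -1
            · have hloop : dfsLoopA (dfsA g (uZ s.1 + 1))
                  (pvGetI (pvRow g node) i :: (pvRow g node).drop (i.toNat + 1)) node cnt s =
                  ((if node = (dfsA g (uZ s.1 + 1) (pvGetI (pvRow g node) i) (cnt + 1) s).1 then -1
                    else (dfsA g (uZ s.1 + 1) (pvGetI (pvRow g node) i) (cnt + 1) s).1),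
                   (pvSet (dfsA g (uZ s.1 + 1) (pvGetI (pvRow g node) i) (cnt + 1) s).2.1 node 2,
                    (dfsA g (uZ s.1 + 1) (pvGetI (pvRow g node) i) (cnt + 1) s).2.2)) := by
                simp only [dfsLoopA]
                simp [hc]
              rw [hloop]
              simp [resumeR, hc]
            · push_neg at hc
              have hloop : dfsLoopA (dfsA g (uZ s.1 + 1))
                  (pvGetI (pvRow g node) i :: (pvRow g node).drop (i.toNat + 1)) node cnt s =
                  dfsLoopA (dfsA g (uZ s.1 + 1)) ((pvRow g node).drop (i.toNat + 1)) node cnt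
                    (dfsA g (uZ s.1 + 1) (pvGetI (pvRow g node) i) (cnt + 1) s).2 := by
                simp only [dfsLoopA]
                simp [hc]
              rw [hloop]
              have hR : resumeR g ((node, i+1, cnt) :: rest) (-1)
                  (dfsA g (uZ s.1 + 1) (pvGetI (pvRow g node) i) (cnt + 1) s).2 =
                  resumeR g rest
                    (dfsLoopA (dfsA g
                        (uZ (dfsA g (uZ s.1 + 1) (pvGetI (pvRow g node) i) (cnt + 1) s).2.1 + 1))
                      ((pvRow g node).drop (i+1).toNat) node cnt
                      (dfsA g (uZ s.1 + 1) (pvGetI (pvRow g node) i) (cnt + 1) s).2).1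
                    (dfsLoopA (dfsA g
                        (uZ (dfsA g (uZ s.1 + 1) (pvGetI (pvRow g node) i) (cnt + 1) s).2.1 + 1))
                      ((pvRow g node).drop (i+1).toNat) node cnt
                      (dfsA g (uZ s.1 + 1) (pvGetI (pvRow g node) i) (cnt + 1) s).2).2 := by
                simp [resumeR]
              rw [hc, hR]
              have hdropOk : ∀ m' ∈ (pvRow g node).drop (i.toNat + 1), NodeOk N m' :=
                fun m' hm' => pvRow_ok N g h node hnode m' (List.mem_of_mem_drop hm')
              have hfe := ((dfs_main N g h
                  (uZ (dfsA g (uZ s.1 + 1) (pvGetI (pvRow g node) i) (cnt + 1) s).2.1 + 1)).2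
                ((pvRow g node).drop (i.toNat + 1)) node cnt
                (dfsA g (uZ s.1 + 1) (pvGetI (pvRow g node) i) (cnt + 1) s).2
                hIc hdropOk hnode (by omega)).2.2 (uZ s.1 + 1) (by omega)
              have : (i+1).toNat = i.toNat + 1 := by omega
              rw [this, hfe]
        · -- neighbours exhausted: pop, hand -1 down
          have hm : machineB g (fB+1) ((node, i, cnt) :: rest) ret s =
              machineB g fB rest (-1) s := by
            simp [machineB, hr, hi]
          have hdropnil : (pvRow g node).drop i.toNat = [] :=
            List.drop_eq_nil_of_le (by omega)
          have hres : resumeR g ((node, i, cnt) :: rest) ret s = resumeR g rest (-1) s := by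
            simp [resumeR, hr, hdropnil, dfsLoopA]
          rw [hm, hres]
          apply ih rest _ _ hInv hOKr
          show (rest.map (wF g)).sum + uZ s.1 * (maxRowB g + 3) < fB
          omega

theorem joyGo_spec : Claim_equal_joyGo := by
  intro N g _hDom hPre
  obtain ⟨h1, hL1, hcase⟩ := hPre
  show joyGo N g = joyGo_alt N g
  have hg0 : pvGetI (List.replicate N.toNat (0:Int)) 0 = 0 := by
    have := pvGetI_in (List.replicate N.toNat (0:Int)) 0 (by omega) (by simp; omega)
    simpa using this
  have hsM1 : uZ (pvSet (List.replicate N.toNat (0:Int)) 0 1) + 1 = N.toNat := by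
    rw [pvSet_nonneg _ _ _ (by omega : (0:Int) ≤ 0)]
    exact (uZ_set_eq (List.replicate N.toNat (0:Int)) (0:Int).toNat 1 (by simp; omega)
      (by simp) (by norm_num)).trans (uZ_replicate _)
  have hstep : dfsA g (N.toNat + 1) 0 0 (List.replicate N.toNat 0, List.replicate N.toNat 0)
      = dfsLoopA (dfsA g N.toNat) (pvRow g 0) 0 0
        (pvSet (List.replicate N.toNat 0) 0 1, pvSet (List.replicate N.toNat 0) 0 0) := by
    simp [dfsA, hg0]
  rcases hcase with hempty | hmain
  · -- node 0 has no neighbours: both traversals stop after marking node 0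
    obtain ⟨tl, rfl⟩ : ∃ tl, g = [] :: tl := by
      cases g with
      | nil => simp at hL1
      | cons a tl =>
        have : a = [] := by simpa using hempty
        exact ⟨tl, by rw [this]⟩
    have hrow0 : pvRow ([] :: tl) 0 = [] := by
      simp [pvRow, PySem.List.pyGetD_zero_cons]
    obtain ⟨f2, hf2⟩ : ∃ f2, (maxRowB ([] :: tl) + 3) * (N.toNat + 2) = f2 + 2 := by
      have h6 : 3 * 2 ≤ (maxRowB ([] :: tl) + 3) * (N.toNat + 2) :=
        Nat.mul_le_mul (by omega) (by omega)
      exact ⟨(maxRowB ([] :: tl) + 3) * (N.toNat + 2) - 2, by omega⟩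
    simp only [joyGo, joyGo_alt]
    rw [hstep, hg0, hrow0, hf2]
    simp only [ne_eq, not_true_eq_false, if_neg, not_false_eq_true]
    simp [machineB, dfsLoopA, hrow0]
  · have hG : GoodG N g := ⟨h1, hmain.1, hmain.2⟩
    have hok0 : NodeOk N 0 := ⟨by omega, by omega⟩
    have hIM : InvS N (pvSet (List.replicate N.toNat 0) 0 1, pvSet (List.replicate N.toNat 0) 0 0) :=
      ⟨by show (pvSet (List.replicate N.toNat 0) 0 1).length = N.toNat
          rw [length_pvSet, List.length_replicate],
       by show (pvSet (List.replicate N.toNat 0) 0 0).length = N.toNat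
          rw [length_pvSet, List.length_replicate]⟩
    have hOK : StackOK N [((0:Int), (0:Int), (0:Int))] := by
      intro fr hf
      have : fr = ((0:Int), (0:Int), (0:Int)) := by simpa using hf
      subst this
      exact ⟨⟨by omega, by omega⟩, by show (0:Int) ≤ 0; omega⟩
    have hphi : phi g [((0:Int), (0:Int), (0:Int))]
        (pvSet (List.replicate N.toNat 0) 0 1, pvSet (List.replicate N.toNat 0) 0 0)
        < (maxRowB g + 3) * (N.toNat + 2) := by
      simp only [phi, List.map_cons, List.map_nil, List.sum_cons, List.sum_nil]
      have hw : wF g ((0:Int), (0:Int), (0:Int)) = (pvRow g 0).length + 2 := by simp [wF]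
      rw [hw]
      have hL0 : (pvRow g 0).length ≤ maxRowB g := le_maxRowB g _ (pvRow_mem N g hG 0 hok0)
      have hmul : (maxRowB g + 3) * (N.toNat + 2) =
          uZ (pvSet (List.replicate N.toNat 0) 0 1) * (maxRowB g + 3) + 3 * (maxRowB g + 3) := by
        have hn : N.toNat + 2 = uZ (pvSet (List.replicate N.toNat 0) 0 1) + 3 := by omega
        rw [hn]; ring
      omega
    have hsim := sim N g hG ((maxRowB g + 3) * (N.toNat + 2))
      [((0:Int), (0:Int), (0:Int))] (-1)
      (pvSet (List.replicate N.toNat 0) 0 1, pvSet (List.replicate N.toNat 0) 0 0) hIM hOK hphi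
    have hres : resumeR g [((0:Int), (0:Int), (0:Int))] (-1)
        (pvSet (List.replicate N.toNat 0) 0 1, pvSet (List.replicate N.toNat 0) 0 0) =
        (dfsLoopA (dfsA g (uZ (pvSet (List.replicate N.toNat (0:Int)) 0 1) + 1)) (pvRow g 0) 0 0
          (pvSet (List.replicate N.toNat 0) 0 1, pvSet (List.replicate N.toNat 0) 0 0)).2 := by
      simp [resumeR]
    rw [hsM1] at hres
    simp only [joyGo, joyGo_alt]
    rw [hstep, hg0]
    simp only [ne_eq, not_true_eq_false, if_neg, not_false_eq_true]
    rw [hsim, hres]
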